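-- pv_equiv track=rewrite | github.com/nyimbi/apg | capabilities/intel/crawler/gdelt_crawler/utils/ml_integration.py | _classify_conflict
-- ===== SOURCE A (Python) =====
-- from typing import Dict, List, Optional, Any, Union, Tuple
--
-- def _classify_conflict(content: str, key_phrases: List[str], fatalities: Optional[int]) -> Optional[str]:
--     """Classify conflict type."""
--     if fatalities and fatalities > 0:
--         if fatalities >= 25:
--             return 'high_intensity_conflict'
--         elif fatalities >= 5:
--             return 'medium_intensity_conflict'
--         else:
--             return 'low_intensity_conflict'
--
--     if any(phrase in ['attack', 'bombing', 'fighting'] for phrase in key_phrases):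
--         return 'violent_conflict'
--
--     if any(phrase in ['protest', 'demonstration'] for phrase in key_phrases):
--         return 'non_violent_conflict'
--
--     return None
-- ===== SOURCE B (Python) =====
-- _VIOLENT = frozenset(('attack', 'bombing', 'fighting'))
-- _NON_VIOLENT = frozenset(('protest', 'demonstration'))
--
--
-- def _classify_conflict(content, key_phrases, fatalities):
--     if fatalities and fatalities > 0:
--         level = (fatalities >= 5) + (fatalities >= 25)
--         return ('low_intensity_conflict',
--                 'medium_intensity_conflict',
--                 'high_intensity_conflict')[level]
--     score = 0
--     for p in key_phrases:
--         score = max(score, 2 if p in _VIOLENT else 1 if p in _NON_VIOLENT else 0)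
--     return (None, 'non_violent_conflict', 'violent_conflict')[score]
-- ===== Notes on version B (the rewrite author's own statement) =====
-- stated objective: alternative
-- what changed: Replaced A's if/elif threshold cascade by an arithmetic severity index ((f>=5)+(f>=25)) into a tuple, and replaced the two staged any()-membership scans by ONE pass over key_phrases maintaining a max-score accumulator that is then indexed into a label tuple.
import Mathlib
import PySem

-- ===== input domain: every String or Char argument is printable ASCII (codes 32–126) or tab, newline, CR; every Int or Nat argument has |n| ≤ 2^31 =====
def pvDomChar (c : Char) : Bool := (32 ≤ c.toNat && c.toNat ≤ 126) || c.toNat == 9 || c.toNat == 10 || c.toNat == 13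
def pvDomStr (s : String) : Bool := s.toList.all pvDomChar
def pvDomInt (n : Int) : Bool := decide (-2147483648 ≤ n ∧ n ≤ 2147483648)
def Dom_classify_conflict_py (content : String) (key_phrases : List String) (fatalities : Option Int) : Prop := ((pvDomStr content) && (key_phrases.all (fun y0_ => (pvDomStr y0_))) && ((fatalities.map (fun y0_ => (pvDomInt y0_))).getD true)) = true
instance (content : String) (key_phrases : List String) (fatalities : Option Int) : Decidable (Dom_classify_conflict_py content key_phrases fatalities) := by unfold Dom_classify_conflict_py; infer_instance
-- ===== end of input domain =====

-- B replaces A's if/elif cascade by an arithmetic severity index and A's two staged any() scans by a single max-score fold over key_phrases (objective: alternative; same cost).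


-- ===== PORT A =====
-- phrase branches shared by both exit points of A (literal: the code after the fatalities block)
def pvPhraseTail (key_phrases : List String) : Option String :=
  if key_phrases.any (fun phrase => phrase ∈ ["attack", "bombing", "fighting"]) then
    some "violent_conflict"
  else if key_phrases.any (fun phrase => phrase ∈ ["protest", "demonstration"]) then
    some "non_violent_conflict"
  else none

def classify_conflict_py (content : String) (key_phrases : List String) (fatalities : Option Int) : Option String :=
  match fatalities with
  | some f =>
      -- Python truthiness: `fatalities and fatalities > 0` = f ≠ 0 ∧ f > 0
      if f ≠ 0 ∧ 0 < f then
        if f ≥ 25 then some "high_intensity_conflict"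
        else if f ≥ 5 then some "medium_intensity_conflict"
        else some "low_intensity_conflict"
      else pvPhraseTail key_phrases
  | none => pvPhraseTail key_phrases

-- ===== PORT B =====
-- score of one phrase: 2 if violent keyword, 1 if non-violent keyword, else 0
def pvScore (p : String) : Nat :=
  if p ∈ ["attack", "bombing", "fighting"] then 2
  else if p ∈ ["protest", "demonstration"] then 1 else 0

def classify_conflict_py_alt (content : String) (key_phrases : List String) (fatalities : Option Int) : Option String :=
  match fatalities with
  | some f =>
      if f ≠ 0 ∧ 0 < f then
        -- level = (f>=5) + (f>=25), tuple index (always in range)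
        let level : Nat := (if f ≥ 5 then 1 else 0) + (if f ≥ 25 then 1 else 0)
        some (["low_intensity_conflict", "medium_intensity_conflict",
               "high_intensity_conflict"].getD level "")
      else
        -- single pass: max-score accumulator, then tuple index
        let score := key_phrases.foldl (fun s p => max s (pvScore p)) 0
        ([none, some "non_violent_conflict", some "violent_conflict"].getD score none)
  | none =>
      let score := key_phrases.foldl (fun s p => max s (pvScore p)) 0
      ([none, some "non_violent_conflict", some "violent_conflict"].getD score none)

-- ===== PRECONDITION & SPEC =====
def Spec_classify_conflict_py (content : String) (key_phrases : List String) (fatalities : Option Int) (out : Option String) : Prop := out = classify_conflict_py_alt content key_phrases fatalities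
instance (content : String) (key_phrases : List String) (fatalities : Option Int) (out : Option String) : Decidable (Spec_classify_conflict_py content key_phrases fatalities out) := by unfold Spec_classify_conflict_py; infer_instance

-- ===== CLAIM (what is proved, stated in full; the proofs are below) =====
def Claim_equal_classify_conflict_py : Prop := ∀ (content : String) (key_phrases : List String) (fatalities : Option Int), Dom_classify_conflict_py content key_phrases fatalities → Spec_classify_conflict_py content key_phrases fatalities (classify_conflict_py content key_phrases fatalities)

-- ===== LEMMAS AND PROOFS =====
-- characterisation of the fold: its result is the max of the accumulator and the "any" shape of A
theorem score_foldl (kp : List String) : ∀ (a : Nat),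
    kp.foldl (fun s p => max s (pvScore p)) a =
      max a (if kp.any (fun phrase => phrase ∈ ["attack", "bombing", "fighting"]) then 2
             else if kp.any (fun phrase => phrase ∈ ["protest", "demonstration"]) then 1 else 0) := by
  induction kp with
  | nil => intro a; simp
  | cons p rest ih =>
      intro a
      rw [List.foldl_cons, ih (max a (pvScore p))]
      simp only [List.any_cons, pvScore]
      by_cases h1 : p ∈ ["attack", "bombing", "fighting"] <;>
        by_cases h2 : p ∈ ["protest", "demonstration"] <;>
        simp only [h1, h2, decide_true, decide_false, Bool.true_or, Bool.false_or,
          if_true, if_false] <;>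
        first
        | (split_ifs <;> omega)
        | omega

theorem tail_eq (kp : List String) :
    pvPhraseTail kp =
      ([none, some "non_violent_conflict", some "violent_conflict"].getD
        (kp.foldl (fun s p => max s (pvScore p)) 0) none) := by
  rw [score_foldl kp 0]
  unfold pvPhraseTail
  split_ifs <;> rfl

-- ===== VERDICT (by name: the statement is the Claim_ definition above) =====
theorem classify_conflict_py_spec : Claim_equal_classify_conflict_py := by
  intro content key_phrases fatalities _
  unfold Spec_classify_conflict_py classify_conflict_py classify_conflict_py_alt
  match fatalities with
  | none => exact tail_eq key_phrases
  | some f =>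
      simp only
      by_cases h : f ≠ 0 ∧ 0 < f
      · rw [if_pos h, if_pos h]
        by_cases h25 : f ≥ 25
        · rw [if_pos h25, if_pos (by omega : f ≥ 5), if_pos h25]
          rfl
        · rw [if_neg h25]
          by_cases h5 : f ≥ 5
          · rw [if_pos h5, if_pos h5, if_neg h25]
            rfl
          · rw [if_neg h5, if_neg h5, if_neg h25]
            rfl
      · rw [if_neg h, if_neg h]
        exact tail_eq key_phrases
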